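-- pv_equiv track=rewrite | github.com/IraitzTB/agent | src/tbbot/greeting.py | detect_greeting_language
-- ===== SOURCE A (Python) =====
-- def detect_greeting_language(message: str) -> str | None:
--     """
--     Detects if a message contains a greeting and returns the language.
--
--     Args:
--         message: The student's input message
--
--     Returns:
--         Language code ('en', 'ca', 'eu', 'gl') if greeting detected, None otherwise
--     """
--     if not message or not message.strip():
--         return None
--
--     # Convert to lowercase for case-insensitive matching
--     message_lower = message.lower()
--
--     # Define greetings by language with priority order
--     # Order matters: first match wins
--     greetings = [
--         (["hello", "hi", "hey"], "en"),  # English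
--         (["hola"], "ca"),  # Catalan
--         (["kaixo"], "eu"),  # Basque
--         (["ola"], "gl"),  # Galician
--     ]
--
--     # Split message into words for whole-word matching
--     words = message_lower.split()
--
--     # Check each language's greetings in priority order
--     for keywords, language in greetings:
--         if any(keyword in words for keyword in keywords):
--             return language
--
--     return None
-- ===== SOURCE B (Python) =====
-- GREETING_PRIORITY = {
--     "hello": (0, "en"), "hi": (0, "en"), "hey": (0, "en"),
--     "hola": (1, "ca"), "kaixo": (2, "eu"), "ola": (3, "gl"),
-- }
--
--
-- def detect_greeting_language(message: str) -> str | None: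
--     best = None
--     for word in message.lower().split():
--         entry = GREETING_PRIORITY.get(word)
--         if entry is not None and (best is None or entry[0] < best[0]):
--             best = entry
--     return best[1] if best is not None else None
-- ===== Notes on version B (the rewrite author's own statement) =====
-- stated objective: alternative
-- what changed: Replaces A's priority-ordered scan over per-language keyword lists (each doing a membership test against the whole word list) by a single fold over the message's words using a keyword-to-(priority,language) dict, tracking the minimum priority entry; the redundant empty/whitespace guard is dropped since splitting such a message yields no words.
import Mathlib
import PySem

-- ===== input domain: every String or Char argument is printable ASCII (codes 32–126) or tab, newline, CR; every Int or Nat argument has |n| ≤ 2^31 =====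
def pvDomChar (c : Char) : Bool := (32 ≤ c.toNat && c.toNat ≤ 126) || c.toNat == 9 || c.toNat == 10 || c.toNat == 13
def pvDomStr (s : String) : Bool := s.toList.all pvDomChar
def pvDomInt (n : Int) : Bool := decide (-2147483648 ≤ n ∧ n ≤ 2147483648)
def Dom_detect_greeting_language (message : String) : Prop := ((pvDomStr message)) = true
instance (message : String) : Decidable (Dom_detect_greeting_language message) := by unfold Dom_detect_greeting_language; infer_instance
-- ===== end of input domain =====

-- B replaces A's priority-ordered keyword-list scan by a single fold over the words with a keyword→(priority, language) dict, tracking the minimum priority (alternative decomposition, same behaviour).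


-- ===== PORT A =====
def pvGreetingsA : List (List String × String) :=
  [(["hello", "hi", "hey"], "en"), (["hola"], "ca"), (["kaixo"], "eu"), (["ola"], "gl")]

-- the 'for keywords, language in greetings' loop with its early return
def pvLoopA (words : List String) : List (List String × String) → Option String
  | [] => none
  | (keywords, language) :: rest =>
    if keywords.any (fun keyword => words.contains keyword) then some language
    else pvLoopA words rest

def detect_greeting_language (message : String) : Option String :=
  if PySem.Str.len message = 0 ∨ PySem.Str.len (PySem.Str.strip message) = 0 then none
  else
    let message_lower := PySem.Str.lower message
    let words := PySem.Str.split₀ message_lower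
    pvLoopA words pvGreetingsA

-- ===== PORT B =====
def pvGreetingPriority : PySem.Dict String (Nat × String) :=
  PySem.Dict.ofList
    [("hello", (0, "en")), ("hi", (0, "en")), ("hey", (0, "en")),
     ("hola", (1, "ca")), ("kaixo", (2, "eu")), ("ola", (3, "gl"))]

-- one iteration of B's 'for word in …' loop: keep the entry with the smaller priority
def pvStepB (best : Option (Nat × String)) (word : String) : Option (Nat × String) :=
  match pvGreetingPriority.get? word with
  | none => best
  | some entry =>
    match best with
    | none => some entry
    | some b => if entry.1 < b.1 then some entry else best

def detect_greeting_language_alt (message : String) : Option String :=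
  match (PySem.Str.split₀ (PySem.Str.lower message)).foldl pvStepB none with
  | none => none
  | some best => some best.2

-- ===== PRECONDITION & SPEC =====
def Spec_detect_greeting_language (message : String) (out : Option String) : Prop := out = detect_greeting_language_alt message
instance (message : String) (out : Option String) : Decidable (Spec_detect_greeting_language message out) := by unfold Spec_detect_greeting_language; infer_instance

-- ===== CLAIM (what is proved, stated in full; the proofs are below) =====
def Claim_equal_detect_greeting_language : Prop := ∀ (message : String), Dom_detect_greeting_language message → Spec_detect_greeting_language message (detect_greeting_language message)

-- ===== LEMMAS AND PROOFS =====

-- the priority index of a word: its dict priority, or 4 if it is no greeting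
def pvIdx (w : String) : Nat :=
  match pvGreetingPriority.get? w with
  | some e => e.1
  | none => 4

-- the accumulator of B's fold, as a function of the best priority index seen so far
def pvRep : Nat → Option (Nat × String)
  | 0 => some (0, "en")
  | 1 => some (1, "ca")
  | 2 => some (2, "eu")
  | 3 => some (3, "gl")
  | _ => none

theorem pvPrio_get?_eq (w : String) :
    pvGreetingPriority.get? w =
      if "hello" = w then some (0, "en") else if "hi" = w then some (0, "en")
      else if "hey" = w then some (0, "en") else if "hola" = w then some (1, "ca")
      else if "kaixo" = w then some (2, "eu") else if "ola" = w then some (3, "gl")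
      else none := by
  have h : pvGreetingPriority = PySem.Dict.mk
      [("hello", (0, "en")), ("hi", (0, "en")), ("hey", (0, "en")),
       ("hola", (1, "ca")), ("kaixo", (2, "eu")), ("ola", (3, "gl"))] := by decide
  rw [h]
  simp only [PySem.Dict.get?_mk_cons]
  have hnil : (PySem.Dict.mk ([] : List (String × (Nat × String)))).get? w = none := rfl
  rw [hnil]
  simp only [beq_iff_eq]

theorem pvIdx_eq (w : String) :
    pvIdx w =
      if "hello" = w ∨ "hi" = w ∨ "hey" = w then 0
      else if "hola" = w then 1 else if "kaixo" = w then 2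
      else if "ola" = w then 3 else 4 := by
  unfold pvIdx
  rw [pvPrio_get?_eq]
  split_ifs <;> first | rfl | tauto

theorem pvStepB_rep (n : Nat) (w : String) :
    pvStepB (pvRep n) w = pvRep (min n (pvIdx w)) := by
  unfold pvStepB pvIdx
  rw [pvPrio_get?_eq]
  split_ifs <;>
    rcases n with _ | _ | _ | _ | n <;>
    simp [pvRep]

theorem pvFold_rep (ws : List String) (n : Nat) :
    ws.foldl pvStepB (pvRep n) = pvRep (ws.foldl (fun a w => min a (pvIdx w)) n) := by
  induction ws generalizing n with
  | nil => rfl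
  | cons w ws ih => simp only [List.foldl_cons, pvStepB_rep, ih]

theorem pvFoldMin_le (ws : List String) (n : Nat) :
    ws.foldl (fun a w => min a (pvIdx w)) n ≤ n := by
  induction ws generalizing n with
  | nil => simp
  | cons w ws ih => exact le_trans (ih _) (Nat.min_le_left _ _)

theorem pvFoldMin_lb (ws : List String) (n : Nat) (w : String) (hw : w ∈ ws) :
    ws.foldl (fun a w => min a (pvIdx w)) n ≤ pvIdx w := by
  induction ws generalizing n with
  | nil => cases hw
  | cons x ws ih =>
    simp only [List.foldl_cons]
    rcases List.mem_cons.1 hw with h | h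
    · subst h; exact le_trans (pvFoldMin_le _ _) (Nat.min_le_right _ _)
    · exact ih _ h

theorem pvFoldMin_mem (ws : List String) (n : Nat) :
    ws.foldl (fun a w => min a (pvIdx w)) n = n ∨
      ∃ w ∈ ws, pvIdx w = ws.foldl (fun a w => min a (pvIdx w)) n := by
  induction ws generalizing n with
  | nil => left; rfl
  | cons x ws ih =>
    simp only [List.foldl_cons]
    rcases ih (min n (pvIdx x)) with h | ⟨w, hw, hidx⟩
    · rw [h]
      rcases Nat.le_total n (pvIdx x) with h1 | h1
      · left; exact Nat.min_eq_left h1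
      · right; exact ⟨x, List.mem_cons_self, (Nat.min_eq_right h1).symm⟩
    · right; exact ⟨w, List.mem_cons_of_mem _ hw, hidx⟩

-- B's fold agrees with A's priority-ordered scan on any word list
theorem pvMain (ws : List String) :
    pvLoopA ws pvGreetingsA =
      match ws.foldl pvStepB none with
      | none => none
      | some best => some best.2 := by
  have hrep : (none : Option (Nat × String)) = pvRep 4 := rfl
  rw [hrep, pvFold_rep]
  set m := ws.foldl (fun a w => min a (pvIdx w)) 4 with hm
  have hle : m ≤ 4 := pvFoldMin_le ws 4
  have hlb : ∀ w ∈ ws, m ≤ pvIdx w := fun w hw => pvFoldMin_lb ws 4 w hw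
  have hmem := pvFoldMin_mem ws 4
  rw [← hm] at hmem
  -- membership of a keyword forces an upper bound on m
  have hkey : ∀ w ∈ ws, pvIdx w < m → False := fun w hw h => absurd (hlb w hw) (by omega)
  simp only [pvLoopA, pvGreetingsA, List.any_cons, List.any_nil, Bool.or_false,
    List.contains_eq_mem, Bool.or_eq_true, decide_eq_true_eq]
  interval_cases m
  · -- m = 0 : some English keyword occurs
    rcases hmem with h | ⟨w, hw, hidx⟩
    · omega
    · rw [pvIdx_eq] at hidx
      split_ifs at hidx with h1 h2 h3 h4
      all_goals first
        | (rw [if_pos]; · rfl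
           · rcases h1 with h | h | h <;> subst h <;> tauto)
        | omega
  · -- m = 1 : "hola" occurs, no English keyword
    rcases hmem with h | ⟨w, hw, hidx⟩
    · omega
    · rw [pvIdx_eq] at hidx
      split_ifs at hidx with h1 h2 h3 h4 <;> try omega
      subst h2
      rw [if_neg, if_pos]
      · rfl
      · exact hw
      · rintro (h | h | h) <;>
          exact hkey _ h (by rw [pvIdx_eq]; simp; try omega)
  · -- m = 2 : "kaixo" occurs
    rcases hmem with h | ⟨w, hw, hidx⟩
    · omega
    · rw [pvIdx_eq] at hidx
      split_ifs at hidx with h1 h2 h3 h4 <;> try omega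
      subst h3
      rw [if_neg, if_neg, if_pos]
      · rfl
      · exact hw
      · intro h; exact hkey _ h (by rw [pvIdx_eq]; simp; try omega)
      · rintro (h | h | h) <;>
          exact hkey _ h (by rw [pvIdx_eq]; simp; try omega)
  · -- m = 3 : "ola" occurs
    rcases hmem with h | ⟨w, hw, hidx⟩
    · omega
    · rw [pvIdx_eq] at hidx
      split_ifs at hidx with h1 h2 h3 h4 <;> try omega
      subst h4
      rw [if_neg, if_neg, if_neg, if_pos]
      · rfl
      · exact hw
      · intro h; exact hkey _ h (by rw [pvIdx_eq]; simp; try omega)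
      · intro h; exact hkey _ h (by rw [pvIdx_eq]; simp; try omega)
      · rintro (h | h | h) <;>
          exact hkey _ h (by rw [pvIdx_eq]; simp; try omega)
  · -- m = 4 : no keyword at all
    rw [if_neg, if_neg, if_neg, if_neg]
    · rfl
    · intro h; exact hkey _ h (by rw [pvIdx_eq]; simp; try omega)
    · intro h; exact hkey _ h (by rw [pvIdx_eq]; simp; try omega)
    · intro h; exact hkey _ h (by rw [pvIdx_eq]; simp; try omega)
    · rintro (h | h | h) <;>
        exact hkey _ h (by rw [pvIdx_eq]; simp; try omega)

-- if the message is all whitespace (or empty), its split is empty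
theorem pvSplit_nil_of_all_space (cs : List Char)
    (h : ∀ c ∈ cs, PySem.Chars.isspace c = true) : PySem.Chars.split₀ cs = [] := by
  have go : ∀ cs, (∀ c ∈ cs, PySem.Chars.isspace c = true) →
      ∀ acc, PySem.Chars.split₀.go cs [] acc = acc.reverse := by
    intro cs h
    induction cs with
    | nil => intro acc; simp [PySem.Chars.split₀.go]
    | cons c rest ih =>
      intro acc
      have hc := h c (List.mem_cons_self)
      simp only [PySem.Chars.split₀.go, hc, if_true, List.isEmpty_nil]
      exact ih (fun c hc => h c (List.mem_cons_of_mem _ hc)) acc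
  exact go cs h []

theorem pvAll_space_of_strip_nil (cs : List Char)
    (h : PySem.Chars.strip cs = []) : ∀ c ∈ cs, PySem.Chars.isspace c = true := by
  unfold PySem.Chars.strip PySem.Chars.rstrip PySem.Chars.lstrip at h
  have h1 : List.dropWhile PySem.Chars.isspace (List.dropWhile PySem.Chars.isspace cs).reverse = [] := by
    simpa using congrArg List.reverse h
  have h2 : ∀ c ∈ (List.dropWhile PySem.Chars.isspace cs).reverse, PySem.Chars.isspace c = true :=
    List.dropWhile_eq_nil_iff.1 h1
  intro c hc
  have hc' : c ∈ List.takeWhile PySem.Chars.isspace cs ++ List.dropWhile PySem.Chars.isspace cs := by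
    rw [List.takeWhile_append_dropWhile]; exact hc
  rcases List.mem_append.1 hc' with h3 | h3
  · exact List.mem_takeWhile_imp h3
  · exact h2 c (List.mem_reverse.2 h3)

theorem pvLower_space (c : Char) :
    PySem.Chars.isspace (PySem.Chars.lowerChar c) = PySem.Chars.isspace c := by
  unfold PySem.Chars.lowerChar
  by_cases h : PySem.Chars.isupper c = true
  · rw [if_pos h]
    have hn : 65 ≤ c.toNat ∧ c.toNat ≤ 90 := by
      simpa [PySem.Chars.isupper, Char.le_def] using h
    have hv : (c.toNat + 32).isValidChar := Or.inl (by omega)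
    have ht : (Char.ofNat (c.toNat + 32)).toNat = c.toNat + 32 := by
      rw [Char.toNat_ofNat, if_pos hv]
    have key : ∀ d : Char, 65 ≤ d.toNat → d.toNat ≤ 122 → PySem.Chars.isspace d = false := by
      intro d h1 h2
      unfold PySem.Chars.isspace
      simp only [Bool.or_eq_false_iff, Bool.and_eq_false_iff, decide_eq_false_iff_not]
      omega
    rw [key _ (by rw [ht]; omega) (by rw [ht]; omega), key c (by omega) (by omega)]
  · rw [if_neg h]

-- ===== VERDICT (by name: the statement is the Claim_ definition above) =====
theorem detect_greeting_language_spec : Claim_equal_detect_greeting_language := by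
  intro message _
  unfold Spec_detect_greeting_language detect_greeting_language detect_greeting_language_alt
  split_ifs with h
  · -- guard: message empty or all whitespace ⇒ the word list is empty
    have hsp : ∀ c ∈ message.toList, PySem.Chars.isspace c = true := by
      rcases h with h | h
      · have : message.toList = [] := by
          simpa [PySem.Str.len] using h
        simp [this]
      · apply pvAll_space_of_strip_nil
        have : (PySem.Str.strip message).toList = [] := by
          have := congrArg String.toList (String.ext_iff.2 ?_ : PySem.Str.strip message = "")
          · simpa using this
          · have hl : (PySem.Str.strip message).toList.length = 0 := by
              simpa [PySem.Str.len] using h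
            simpa [String.ext_iff] using List.length_eq_zero_iff.1 hl
        simpa [PySem.Str.toList_strip] using this
    have hws : PySem.Str.split₀ (PySem.Str.lower message) = [] := by
      unfold PySem.Str.split₀
      rw [pvSplit_nil_of_all_space]
      · rfl
      · intro c hc
        rw [PySem.Str.toList_lower, PySem.Chars.lower] at hc
        rcases List.mem_map.1 hc with ⟨c', hc', rfl⟩
        rw [pvLower_space]
        exact hsp c' hc'
    rw [hws]
    rfl
  · exact pvMain _
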